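-- pv_equiv track=rewrite | github.com/rubengrootroessink/AdventOfCode | 2020/13/1.py | multiple
-- ===== SOURCE A (Python) =====
-- def multiple(timestamp, busses):
--     result = []
--     for bus in busses:
--         multiple = bus
--         while multiple < timestamp:
--             multiple = multiple + bus
--         result.append((multiple, bus))
--     return sorted(result)
-- ===== SOURCE B (Python) =====
-- def multiple(timestamp, busses):
--     # closed-form ceiling division per bus instead of A's counting loop
--     return sorted((max(bus, -(-timestamp // bus) * bus), bus) for bus in busses)
-- ===== Notes on version B (the rewrite author's own statement) =====
-- stated objective: alternative
-- what changed: Each bus's next departure is computed by one closed-form ceiling division (max(bus, -(-timestamp // bus) * bus)) instead of A's loop that adds bus until reaching the timestamp; intended as faster (A did not finish at a timing run's larger sizes) but a timing run could not confirm a ratio, so none is claimed.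
-- outside the precondition, e.g. on multiple(0, [0]): A returns [(0, 0)], B raises ZeroDivisionError
import Mathlib
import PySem

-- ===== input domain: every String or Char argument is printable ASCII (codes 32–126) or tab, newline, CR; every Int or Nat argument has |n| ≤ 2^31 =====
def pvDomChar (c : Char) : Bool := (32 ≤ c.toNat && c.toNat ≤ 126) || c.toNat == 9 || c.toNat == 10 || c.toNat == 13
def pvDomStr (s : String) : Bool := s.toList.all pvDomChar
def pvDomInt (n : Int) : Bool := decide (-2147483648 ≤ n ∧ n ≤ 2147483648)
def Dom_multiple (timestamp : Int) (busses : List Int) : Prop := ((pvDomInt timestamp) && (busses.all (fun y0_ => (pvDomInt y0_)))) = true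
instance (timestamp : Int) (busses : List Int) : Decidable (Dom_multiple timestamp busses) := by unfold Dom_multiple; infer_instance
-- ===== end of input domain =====

-- B replaces A's per-bus counting loop by one closed-form ceiling division per bus (alternative algorithm).

-- ===== PORT A =====
-- A's inner `while multiple < timestamp: multiple += bus`; the `0 < bus` conjunct is a
-- totality guard only (for bus ≤ 0 < difference the Python loop never terminates; Pre_ excludes those inputs).
def multipleLoop (timestamp bus m : Int) : Int :=
  if h : m < timestamp ∧ 0 < bus then multipleLoop timestamp bus (m + bus) else m
termination_by (timestamp - m).toNat
decreasing_by omega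

def multiple (timestamp : Int) (busses : List Int) : List (Int × Int) :=
  PySem.List.sorted2
    (busses.foldl (fun result bus => result ++ [(multipleLoop timestamp bus bus, bus)]) [])
    Prod.fst Prod.snd

-- ===== PORT B =====
def multiple_alt (timestamp : Int) (busses : List Int) : List (Int × Int) :=
  PySem.List.sorted2
    (busses.map (fun bus => (max bus (-(PySem.Int.floordiv (-timestamp) bus) * bus), bus)))
    Prod.fst Prod.snd

-- ===== PRECONDITION & SPEC =====
-- Pre_ excludes busses = 0 (A's loop diverges when 0 < timestamp, and where A does return, at
-- timestamp ≤ 0, B's ceiling division divides by zero) and negative busses below the timestamp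
-- (A's loop diverges there).
def Pre_multiple (timestamp : Int) (busses : List Int) : Prop :=
  ∀ b ∈ busses, b ≠ 0 ∧ (0 < b ∨ timestamp ≤ b)
instance (timestamp : Int) (busses : List Int) : Decidable (Pre_multiple timestamp busses) := by
  unfold Pre_multiple; infer_instance

def pvWitness_multiple : Int × List Int := (10, [7, 13, 59])

def Spec_multiple (timestamp : Int) (busses : List Int) (out : List (Int × Int)) : Prop := out = multiple_alt timestamp busses
instance (timestamp : Int) (busses : List Int) (out : List (Int × Int)) : Decidable (Spec_multiple timestamp busses out) := by unfold Spec_multiple; infer_instance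

-- ===== CLAIM (what is proved, stated in full; the proofs are below) =====
def Claim_equal_multiple : Prop := ∀ (timestamp : Int) (busses : List Int), Dom_multiple timestamp busses → Pre_multiple timestamp busses → Spec_multiple timestamp busses (multiple timestamp busses)

-- ===== LEMMAS AND PROOFS =====

-- the loop reaches exactly the target c when c is a multiple of b steps above m, below t + b, at or above t
lemma multipleLoop_eq_of (t b c : Int) (hb : 0 < b) (hct : c - b < t) (htc : t ≤ c) :
    ∀ (n : Nat) (m : Int), c - m = b * n → multipleLoop t b m = c := by
  intro n
  induction n with
  | zero =>
    intro m hm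
    rw [multipleLoop]
    have : m = c := by omega
    split <;> omega
  | succ k ih =>
    intro m hm
    have hbk : (0:Int) ≤ b * k := by positivity
    have hm' : m < t := by
      have : c - m = b * k + b := by push_cast at hm ⊢; linarith
      omega
    rw [multipleLoop]
    split
    · apply ih
      push_cast at hm ⊢
      linarith
    · omega

lemma perBus_eq (t b : Int) (hb : b ≠ 0) (hbt : 0 < b ∨ t ≤ b) :
    multipleLoop t b b = max b (-(PySem.Int.floordiv (-t) b) * b) := by
  rcases lt_trichotomy b 0 with hneg | hz | hpos
  · -- b < 0, hence t ≤ b: loop exits at once; B's value is also b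
    have htb : t ≤ b := by omega
    have hq := PySem.Int.floordiv_mul_add_mod (-t) b
    have hr := PySem.Int.mod_neg_bounds (a := -t) (b := b) hneg
    rw [multipleLoop]
    rw [dif_neg (by omega)]
    have : -(PySem.Int.floordiv (-t) b) * b ≤ b := by nlinarith [hq, hr.1, hr.2]
    omega
  · omega
  · -- 0 < b
    set q : Int := -(PySem.Int.floordiv (-t) b) with hqdef
    have hq : (q - 1) * b < t ∧ t ≤ q * b :=
      (PySem.Int.neg_floordiv_neg_eq_iff_of_pos (a := t) (b := b) (q := q) hpos).mp rfl
    by_cases hbig : t ≤ b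
    · -- loop exits at once with b; and q*b ≤ b so the max is b
      rw [multipleLoop, dif_neg (by omega)]
      have hqle : q ≤ 1 := by
        by_contra hgt
        push_neg at hgt
        nlinarith [hq.1]
      have : q * b ≤ b := by nlinarith
      omega
    · -- b < t: the loop climbs to q*b
      have hqb : b ≤ q * b := by nlinarith [hq.1, hq.2]
      have hmax : max b (q * b) = q * b := by omega
      rw [hmax]
      have hkex : ∃ n : Nat, q * b - b = b * n := by
        refine ⟨(q - 1).toNat, ?_⟩
        have hq1 : 0 ≤ q - 1 := by nlinarith [hq.2]
        have : ((q - 1).toNat : Int) = q - 1 := Int.toNat_of_nonneg hq1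
        rw [this]; ring
      obtain ⟨n, hn⟩ := hkex
      exact multipleLoop_eq_of t b (q * b) hpos (by linarith [hq.1]) hq.2 n b hn

lemma foldl_append_map (t : Int) (busses : List Int) (f : Int → Int × Int) :
    ∀ acc, busses.foldl (fun result bus => result ++ [f bus]) acc = acc ++ busses.map f := by
  induction busses with
  | nil => simp
  | cons b bs ih => intro acc; simp [ih]

-- ===== VERDICT (by name: the statement is the Claim_ definition above) =====
theorem multiple_spec : Claim_equal_multiple := by
  intro t busses _ hpre
  unfold Spec_multiple multiple multiple_alt
  have h1 := foldl_append_map t busses (fun bus => (multipleLoop t bus bus, bus)) []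
  rw [h1]
  simp only [List.nil_append]
  congr 1
  apply List.map_congr_left
  intro b hb
  obtain ⟨hb0, hbt⟩ := hpre b hb
  rw [perBus_eq t b hb0 hbt]
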